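-- pv_equiv track=rewrite | github.com/Nischal2015/algorithms | algorithms/Medium/smallestDifference.py | getSmallestDifferenceArray
-- ===== SOURCE A (Python) =====
-- def getSmallestDifferenceArray(firstArray, secondArray):
--     sortedFirstArray = sorted(firstArray)
--     sortedSecondArray = sorted(secondArray)
--
--     smallestDifference = float('inf')
--     smallestDifferenceArray = []
--
--     firstArrayIdx = 0
--     secondArrayIdx = 0
--     while firstArrayIdx < len(sortedFirstArray) and secondArrayIdx < len(sortedSecondArray):
--         firstArrayIdxNumber = sortedFirstArray[firstArrayIdx]
--         secondArrayIdxNumber = sortedSecondArray[secondArrayIdx]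
--         absoluteDifference = abs(
--             firstArrayIdxNumber - secondArrayIdxNumber)
--
--         if absoluteDifference < smallestDifference:
--             smallestDifference = absoluteDifference
--             smallestDifferenceArray = [
--                 firstArrayIdxNumber, secondArrayIdxNumber]
--
--         if firstArrayIdxNumber < secondArrayIdxNumber:
--             firstArrayIdx += 1
--         elif firstArrayIdxNumber > secondArrayIdxNumber:
--             secondArrayIdx += 1
--         else:
--             return smallestDifferenceArray
--
--     return smallestDifferenceArray
-- ===== SOURCE B (Python) =====
-- def getSmallestDifferenceArray(firstArray, secondArray):
--     triples = [(abs(a - b), a, b) for a in firstArray for b in secondArray]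
--     if not triples:
--         return []
--     d, a, b = min(triples)
--     return [a, b]
-- ===== Notes on version B (the rewrite author's own statement) =====
-- stated objective: simpler
-- what changed: Replaced the sort-both-arrays + two-pointer scan with strict-improvement bookkeeping by a flat minimum over all pairs under the lexicographic key (|a-b|, a, b), which provably selects the same pair.
import Mathlib
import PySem

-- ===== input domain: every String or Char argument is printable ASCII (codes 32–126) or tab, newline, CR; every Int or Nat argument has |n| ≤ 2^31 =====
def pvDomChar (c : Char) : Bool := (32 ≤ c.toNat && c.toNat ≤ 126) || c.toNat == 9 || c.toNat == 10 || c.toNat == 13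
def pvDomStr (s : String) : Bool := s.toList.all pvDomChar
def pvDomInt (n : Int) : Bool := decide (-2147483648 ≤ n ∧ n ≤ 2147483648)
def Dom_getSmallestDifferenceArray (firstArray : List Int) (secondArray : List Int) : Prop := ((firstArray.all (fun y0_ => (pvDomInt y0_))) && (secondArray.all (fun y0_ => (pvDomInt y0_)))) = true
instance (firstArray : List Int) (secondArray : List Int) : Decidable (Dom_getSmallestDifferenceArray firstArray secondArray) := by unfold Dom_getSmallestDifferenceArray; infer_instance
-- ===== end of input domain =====

-- B replaces A's sort-both + two-pointer scan by a flat minimum over all pairs under the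
-- lexicographic key (|a-b|, a, b); simpler (shorter, no index bookkeeping), not faster.

-- ===== PORT A =====
-- the while loop of A: state = (firstArrayIdx, secondArrayIdx, smallestDifference, smallestDifferenceArray);
-- float('inf') is modelled by Option Int (none = infinity, beaten by every difference).
def smDiffLoop (sf ss : List Int) (i j : Nat) (smallest : Option Int) (best : List Int) : List Int :=
  if h : i < sf.length ∧ j < ss.length then
    let a := sf[i]'h.1
    let b := ss[j]'h.2
    let d := |a - b|
    let upd : Bool := match smallest with
      | none => true
      | some e => decide (d < e)
    let smallest' := if upd then some d else smallest
    let best' := if upd then [a, b] else best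
    if a < b then smDiffLoop sf ss (i + 1) j smallest' best'
    else if b < a then smDiffLoop sf ss i (j + 1) smallest' best'
    else best'
  else best
termination_by (sf.length - i) + (ss.length - j)
decreasing_by all_goals omega

def getSmallestDifferenceArray (firstArray : List Int) (secondArray : List Int) : List Int :=
  let sortedFirstArray := PySem.List.sorted firstArray (fun x => x) false
  let sortedSecondArray := PySem.List.sorted secondArray (fun x => x) false
  smDiffLoop sortedFirstArray sortedSecondArray 0 0 none []

-- ===== PORT B =====
-- the Python tuple (abs(a - b), a, b)
def smKey (a b : Int) : Int × Int × Int := (|a - b|, a, b)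

-- Python's `<` on int 3-tuples (lexicographic)
def tripLt (t u : Int × Int × Int) : Bool :=
  decide (t.1 < u.1 ∨ (t.1 = u.1 ∧ (t.2.1 < u.2.1 ∨ (t.2.1 = u.2.1 ∧ t.2.2 < u.2.2))))

-- port of Source B: build the triples list, [] if empty, else min(triples) (= first minimal, strict-< fold)
def getSmallestDifferenceArray_alt (firstArray : List Int) (secondArray : List Int) : List Int :=
  match firstArray.flatMap (fun a => secondArray.map (fun b => smKey a b)) with
  | [] => []
  | t :: rest =>
    let m := rest.foldl (fun m u => if tripLt u m then u else m) t
    [m.2.1, m.2.2]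

-- ===== PRECONDITION & SPEC =====
def Spec_getSmallestDifferenceArray (firstArray : List Int) (secondArray : List Int) (out : List Int) : Prop := out = getSmallestDifferenceArray_alt firstArray secondArray
instance (firstArray : List Int) (secondArray : List Int) (out : List Int) : Decidable (Spec_getSmallestDifferenceArray firstArray secondArray out) := by unfold Spec_getSmallestDifferenceArray; infer_instance

-- ===== CLAIM (what is proved, stated in full; the proofs are below) =====
def Claim_equal_getSmallestDifferenceArray : Prop := ∀ (firstArray : List Int) (secondArray : List Int), Dom_getSmallestDifferenceArray firstArray secondArray → Spec_getSmallestDifferenceArray firstArray secondArray (getSmallestDifferenceArray firstArray secondArray)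

-- ===== LEMMAS AND PROOFS =====

-- m is the (unique) lexicographically least key of a pair drawn from f × s
def MinPair (f s : List Int) (m : Int × Int × Int) : Prop :=
  (∃ a ∈ f, ∃ b ∈ s, m = smKey a b) ∧
  ∀ a ∈ f, ∀ b ∈ s, tripLt (smKey a b) m = false

theorem tripLt_irrefl (t : Int × Int × Int) : tripLt t t = false := by
  obtain ⟨t1, t2, t3⟩ := t
  simp [tripLt]

theorem tripLt_eq_of_not_not {t u : Int × Int × Int}
    (h1 : tripLt t u = false) (h2 : tripLt u t = false) : t = u := by
  obtain ⟨t1, t2, t3⟩ := t; obtain ⟨u1, u2, u3⟩ := u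
  simp only [tripLt, decide_eq_false_iff_not] at h1 h2
  push Not at h1 h2
  have : t1 = u1 ∧ t2 = u2 ∧ t3 = u3 := by omega
  simp [this.1, this.2.1, this.2.2]

theorem tripLt_trans {x y z : Int × Int × Int}
    (h1 : tripLt x y = true) (h2 : tripLt y z = true) : tripLt x z = true := by
  obtain ⟨x1, x2, x3⟩ := x; obtain ⟨y1, y2, y3⟩ := y; obtain ⟨z1, z2, z3⟩ := z
  simp only [tripLt, decide_eq_true_eq] at h1 h2 ⊢
  omega

theorem notLt_trans {x y z : Int × Int × Int}
    (h1 : tripLt x y = false) (h2 : tripLt y z = false) : tripLt x z = false := by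
  obtain ⟨x1, x2, x3⟩ := x; obtain ⟨y1, y2, y3⟩ := y; obtain ⟨z1, z2, z3⟩ := z
  simp only [tripLt, decide_eq_false_iff_not] at h1 h2 ⊢
  push Not at h1 h2 ⊢
  omega

theorem notLt_of_fst_lt {u v w : Int × Int × Int}
    (h : tripLt u v = false) (hw : w.1 < v.1) : tripLt u w = false := by
  obtain ⟨x1, x2, x3⟩ := u; obtain ⟨y1, y2, y3⟩ := v; obtain ⟨z1, z2, z3⟩ := w
  simp only [tripLt, decide_eq_false_iff_not] at h ⊢
  push Not at h ⊢
  simp only at hw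
  omega

theorem minPair_unique {f s : List Int} {m m' : Int × Int × Int}
    (h : MinPair f s m) (h' : MinPair f s m') : m = m' := by
  obtain ⟨⟨a, ha, b, hb, hm⟩, hmin⟩ := h
  obtain ⟨⟨a', ha', b', hb', hm'⟩, hmin'⟩ := h'
  refine tripLt_eq_of_not_not ?_ ?_
  · rw [hm]; exact hmin' a ha b hb
  · rw [hm']; exact hmin a' ha' b' hb'

theorem minPair_congr {f s f' s' : List Int} {m : Int × Int × Int}
    (hf : ∀ x : Int, x ∈ f ↔ x ∈ f') (hs : ∀ x : Int, x ∈ s ↔ x ∈ s')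
    (h : MinPair f s m) : MinPair f' s' m := by
  obtain ⟨⟨a, ha, b, hb, hm⟩, hmin⟩ := h
  exact ⟨⟨a, (hf a).mp ha, b, (hs b).mp hb, hm⟩,
    fun a' ha' b' hb' => hmin a' ((hf a').mpr ha') b' ((hs b').mpr hb')⟩

-- ========== B-side characterisation ==========

theorem foldMin_spec (rest : List (Int × Int × Int)) : ∀ t : Int × Int × Int,
    (rest.foldl (fun m u => if tripLt u m then u else m) t = t ∨
      rest.foldl (fun m u => if tripLt u m then u else m) t ∈ rest) ∧
    tripLt t (rest.foldl (fun m u => if tripLt u m then u else m) t) = false ∧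
    ∀ u ∈ rest, tripLt u (rest.foldl (fun m u => if tripLt u m then u else m) t) = false := by
  induction rest with
  | nil => intro t; simp [tripLt_irrefl]
  | cons u rs ih =>
    intro t
    simp only [List.foldl_cons]
    by_cases hu : tripLt u t = true
    · rw [if_pos hu]
      obtain ⟨hmem, hacc, hall⟩ := ih u
      refine ⟨?_, ?_, ?_⟩
      · rcases hmem with h | h
        · right; simp [h]
        · right; simp [h]
      · by_contra hc
        rw [Bool.not_eq_false] at hc
        have := tripLt_trans hu hc
        rw [hacc] at this; exact absurd this (by simp)
      · intro v hv
        rcases List.mem_cons.mp hv with rfl | hv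
        · exact hacc
        · exact hall v hv
    · rw [Bool.not_eq_true] at hu
      rw [if_neg (by simp [hu])]
      obtain ⟨hmem, hacc, hall⟩ := ih t
      refine ⟨?_, hacc, ?_⟩
      · rcases hmem with h | h
        · left; exact h
        · right; simp [h]
      · intro v hv
        rcases List.mem_cons.mp hv with rfl | hv
        · exact notLt_trans hu hacc
        · exact hall v hv

theorem mem_triples {f s : List Int} {u : Int × Int × Int} :
    u ∈ f.flatMap (fun a => s.map (fun b => smKey a b)) ↔ ∃ a ∈ f, ∃ b ∈ s, u = smKey a b := by
  simp only [List.mem_flatMap, List.mem_map]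
  constructor
  · rintro ⟨a, ha, b, hb, rfl⟩; exact ⟨a, ha, b, hb, rfl⟩
  · rintro ⟨a, ha, b, hb, rfl⟩; exact ⟨a, ha, b, hb, rfl⟩

theorem alt_minPair (f s : List Int) (hf : f ≠ []) (hs : s ≠ []) :
    ∃ m, MinPair f s m ∧ getSmallestDifferenceArray_alt f s = [m.2.1, m.2.2] := by
  have hne : f.flatMap (fun a => s.map (fun b => smKey a b)) ≠ [] := by
    obtain ⟨a, f', rfl⟩ := List.exists_cons_of_ne_nil hf
    obtain ⟨b, s', rfl⟩ := List.exists_cons_of_ne_nil hs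
    simp
  obtain ⟨t, rest, heq⟩ := List.exists_cons_of_ne_nil hne
  obtain ⟨hmem, hacc, hall⟩ := foldMin_spec rest t
  refine ⟨rest.foldl (fun m u => if tripLt u m then u else m) t, ⟨?_, ?_⟩, ?_⟩
  · have : rest.foldl (fun m u => if tripLt u m then u else m) t
        ∈ f.flatMap (fun a => s.map (fun b => smKey a b)) := by
      rw [heq]
      rcases hmem with h | h
      · simp [h]
      · simp [h]
    exact mem_triples.mp this
  · intro a ha b hb
    have : smKey a b ∈ f.flatMap (fun a => s.map (fun b => smKey a b)) :=
      mem_triples.mpr ⟨a, ha, b, hb, rfl⟩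
    rw [heq] at this
    rcases List.mem_cons.mp this with h | h
    · rw [h]; exact hacc
    · exact hall _ h
  · unfold getSmallestDifferenceArray_alt
    rw [heq]

-- ========== A-side characterisation ==========

-- loop invariant: best pair (a,b) with difference d at position (i,j):
-- d is its difference, both elements occur, best is ≤ the current pair positionally,
-- and best is lexicographically ≤ every pair already excluded from the remaining rectangle.
def InvSome (sf ss : List Int) (i j : Nat) (d a b : Int) : Prop :=
  d = |a - b| ∧ a ∈ sf ∧ b ∈ ss ∧
  (∀ hi : i < sf.length, ∀ hj : j < ss.length,
      a ≤ sf[i] ∧ (a = sf[i] → b ≤ ss[j])) ∧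
  (∀ i' j', (hi' : i' < sf.length) → (hj' : j' < ss.length) → (i' < i ∨ j' < j) →
      tripLt (smKey (sf[i']'hi') (ss[j']'hj')) (d, a, b) = false)

theorem sorted_mono {l : List Int} (hl : l.Pairwise (· ≤ ·)) {p q : Nat}
    (hpq : p ≤ q) (hq : q < l.length) : l[p]'(lt_of_le_of_lt hpq hq) ≤ l[q] := by
  rcases lt_or_eq_of_le hpq with h | rfl
  · exact List.pairwise_iff_getElem.mp hl p q _ hq h
  · exact le_refl _

theorem smDiffLoop_end (sf ss : List Int) (i j : Nat)
    (h : ¬ (i < sf.length ∧ j < ss.length)) (smallest : Option Int) (best : List Int) :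
    smDiffLoop sf ss i j smallest best = best := by
  rw [smDiffLoop, dif_neg h]

theorem smDiffLoop_step (sf ss : List Int) (i j : Nat)
    (h1 : i < sf.length) (h2 : j < ss.length) (smallest : Option Int) (best : List Int)
    (upd : Bool)
    (hupd : upd = match smallest with
      | none => true
      | some e => decide (|sf[i] - ss[j]| < e)) :
    smDiffLoop sf ss i j smallest best =
      if sf[i] < ss[j] then
        smDiffLoop sf ss (i + 1) j (if upd then some |sf[i] - ss[j]| else smallest)
          (if upd then [sf[i], ss[j]] else best)
      else if ss[j] < sf[i] then
        smDiffLoop sf ss i (j + 1) (if upd then some |sf[i] - ss[j]| else smallest)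
          (if upd then [sf[i], ss[j]] else best)
      else (if upd then [sf[i], ss[j]] else best) := by
  subst hupd
  rw [smDiffLoop, dif_pos ⟨h1, h2⟩]

-- at the end of the loop the remaining rectangle is empty, so the invariant gives the minimum
theorem at_end {sf ss : List Int} {i j : Nat} {d a b : Int}
    (hend : ¬ (i < sf.length ∧ j < ss.length)) (hInv : InvSome sf ss i j d a b) :
    MinPair sf ss (d, a, b) := by
  obtain ⟨hd, ha, hb, _, hout⟩ := hInv
  constructor
  · exact ⟨a, ha, b, hb, by simp [smKey, hd]⟩
  · intro x hx y hy
    obtain ⟨i', hi', rfl⟩ := List.mem_iff_getElem.mp hx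
    obtain ⟨j', hj', rfl⟩ := List.mem_iff_getElem.mp hy
    exact hout i' j' hi' hj' (by omega)

-- after an update the new best is the current pair: old excluded pairs stay ≥ (strictly smaller d)
theorem post_upd {sf ss : List Int} {i j : Nat} {d a b : Int}
    (h1 : i < sf.length) (h2 : j < ss.length)
    (hud : |sf[i] - ss[j]| < d) (hInv : InvSome sf ss i j d a b) :
    InvSome sf ss i j |sf[i] - ss[j]| (sf[i]) (ss[j]) := by
  obtain ⟨hd, ha, hb, hpos, hout⟩ := hInv
  refine ⟨rfl, List.getElem_mem h1, List.getElem_mem h2, ?_, ?_⟩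
  · intro hi hj
    exact ⟨le_refl _, fun _ => le_refl _⟩
  · intro i' j' hi' hj' hlt
    exact notLt_of_fst_lt (hout i' j' hi' hj' hlt) hud

-- when there is no update, the old best is lexicographically ≤ the current pair
theorem keep_le_cur {sf ss : List Int} {i j : Nat} {d a b : Int}
    (h1 : i < sf.length) (h2 : j < ss.length)
    (hud : ¬ |sf[i] - ss[j]| < d) (hInv : InvSome sf ss i j d a b) :
    tripLt (smKey (sf[i]) (ss[j])) (d, a, b) = false := by
  obtain ⟨hd, ha, hb, hpos, hout⟩ := hInv
  obtain ⟨hle, himp⟩ := hpos h1 h2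
  by_cases he : a = sf[i]
  · have hb' := himp he
    simp only [tripLt, smKey, decide_eq_false_iff_not]
    push Not
    simp only [Int.abs_eq_natAbs] at hd hud ⊢
    omega
  · simp only [tripLt, smKey, decide_eq_false_iff_not]
    push Not
    simp only [Int.abs_eq_natAbs] at hd hud ⊢
    omega

-- advancing i excludes the pairs (i, j'), j' ≥ j, all of which are ≥ the current pair
theorem step_advance_i {sf ss : List Int} (hsf : sf.Pairwise (· ≤ ·)) (hss : ss.Pairwise (· ≤ ·))
    {i j : Nat} {d a b : Int} (h1 : i < sf.length) (h2 : j < ss.length)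
    (hab : sf[i] < ss[j]) (hInv : InvSome sf ss i j d a b)
    (hcur : tripLt (smKey (sf[i]) (ss[j])) (d, a, b) = false) :
    InvSome sf ss (i + 1) j d a b := by
  obtain ⟨hd, ha, hb, hpos, hout⟩ := hInv
  refine ⟨hd, ha, hb, ?_, ?_⟩
  · intro hi hj
    obtain ⟨hle, himp⟩ := hpos (by omega) hj
    have hmono : sf[i] ≤ sf[i + 1] := sorted_mono hsf (Nat.le_succ i) hi
    refine ⟨le_trans hle hmono, fun he => ?_⟩
    have : a = sf[i]'(by omega) := le_antisymm hle (by rw [he]; exact hmono)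
    exact himp this
  · intro i' j' hi' hj' hlt
    by_cases hold : i' < i ∨ j' < j
    · exact hout i' j' hi' hj' hold
    · have hii : i' = i := by omega
      have hjj : j ≤ j' := by omega
      subst hii
      have hmono : ss[j] ≤ ss[j'] := sorted_mono hss hjj hj'
      refine notLt_trans ?_ hcur
      simp only [tripLt, smKey, decide_eq_false_iff_not]
      push Not
      simp only [Int.abs_eq_natAbs]
      omega

theorem step_advance_j {sf ss : List Int} (hsf : sf.Pairwise (· ≤ ·)) (hss : ss.Pairwise (· ≤ ·))
    {i j : Nat} {d a b : Int} (h1 : i < sf.length) (h2 : j < ss.length)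
    (hba : ss[j] < sf[i]) (hInv : InvSome sf ss i j d a b)
    (hcur : tripLt (smKey (sf[i]) (ss[j])) (d, a, b) = false) :
    InvSome sf ss i (j + 1) d a b := by
  obtain ⟨hd, ha, hb, hpos, hout⟩ := hInv
  refine ⟨hd, ha, hb, ?_, ?_⟩
  · intro hi hj
    obtain ⟨hle, himp⟩ := hpos hi (by omega)
    have hmono : ss[j] ≤ ss[j + 1] := sorted_mono hss (Nat.le_succ j) hj
    exact ⟨hle, fun he => le_trans (himp he) hmono⟩
  · intro i' j' hi' hj' hlt
    by_cases hold : i' < i ∨ j' < j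
    · exact hout i' j' hi' hj' hold
    · have hjj : j' = j := by omega
      have hii : i ≤ i' := by omega
      subst hjj
      have hmono : sf[i] ≤ sf[i'] := sorted_mono hsf hii hi'
      refine notLt_trans ?_ hcur
      simp only [tripLt, smKey, decide_eq_false_iff_not]
      push Not
      simp only [Int.abs_eq_natAbs]
      omega

-- at an equal pair the loop returns: every remaining pair is ≥ the current (difference-0) pair
theorem step_eq {sf ss : List Int} (hsf : sf.Pairwise (· ≤ ·)) (hss : ss.Pairwise (· ≤ ·))
    {i j : Nat} {d a b : Int} (h1 : i < sf.length) (h2 : j < ss.length)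
    (heq : sf[i] = ss[j]) (hInv : InvSome sf ss i j d a b)
    (hcur : tripLt (smKey (sf[i]) (ss[j])) (d, a, b) = false) :
    MinPair sf ss (d, a, b) := by
  obtain ⟨hd, ha, hb, hpos, hout⟩ := hInv
  constructor
  · exact ⟨a, ha, b, hb, by simp [smKey, hd]⟩
  · intro x hx y hy
    obtain ⟨i', hi', rfl⟩ := List.mem_iff_getElem.mp hx
    obtain ⟨j', hj', rfl⟩ := List.mem_iff_getElem.mp hy
    by_cases hold : i' < i ∨ j' < j
    · exact hout i' j' hi' hj' hold
    · have hii : i ≤ i' := by omega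
      have hjj : j ≤ j' := by omega
      have hm1 : sf[i] ≤ sf[i'] := sorted_mono hsf hii hi'
      have hm2 : ss[j] ≤ ss[j'] := sorted_mono hss hjj hj'
      refine notLt_trans ?_ hcur
      simp only [tripLt, smKey, decide_eq_false_iff_not]
      push Not
      simp only [Int.abs_eq_natAbs]
      omega

theorem loop_spec (sf ss : List Int) (hsf : sf.Pairwise (· ≤ ·)) (hss : ss.Pairwise (· ≤ ·)) :
    ∀ k i j d a b, (sf.length - i) + (ss.length - j) ≤ k →
    InvSome sf ss i j d a b →
    ∃ m, MinPair sf ss m ∧ smDiffLoop sf ss i j (some d) [a, b] = [m.2.1, m.2.2] := by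
  intro k
  induction k with
  | zero =>
    intro i j d a b hk hInv
    have hend : ¬ (i < sf.length ∧ j < ss.length) := by omega
    rw [smDiffLoop_end sf ss i j hend]
    exact ⟨(d, a, b), at_end hend hInv, rfl⟩
  | succ k ih =>
    intro i j d a b hk hInv
    by_cases hact : i < sf.length ∧ j < ss.length
    · obtain ⟨h1, h2⟩ := hact
      rw [smDiffLoop_step sf ss i j h1 h2 (some d) [a, b] (decide (|sf[i] - ss[j]| < d)) rfl]
      by_cases hud : |sf[i] - ss[j]| < d
      · simp only [hud, decide_true, if_true]
        have hInvN := post_upd h1 h2 hud hInv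
        have hcurN : tripLt (smKey (sf[i]) (ss[j])) (|sf[i] - ss[j]|, sf[i], ss[j]) = false := by
          simpa [smKey] using tripLt_irrefl (|sf[i] - ss[j]|, sf[i], ss[j])
        by_cases hab : sf[i] < ss[j]
        · rw [if_pos hab]
          exact ih (i + 1) j _ _ _ (by omega) (step_advance_i hsf hss h1 h2 hab hInvN hcurN)
        · rw [if_neg hab]
          by_cases hba : ss[j] < sf[i]
          · rw [if_pos hba]
            exact ih i (j + 1) _ _ _ (by omega) (step_advance_j hsf hss h1 h2 hba hInvN hcurN)
          · rw [if_neg hba]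
            have heq : sf[i] = ss[j] := le_antisymm (le_of_not_gt hba) (le_of_not_gt hab)
            exact ⟨(|sf[i] - ss[j]|, sf[i], ss[j]), step_eq hsf hss h1 h2 heq hInvN hcurN, rfl⟩
      · simp only [hud, decide_false]
        have hcurN := keep_le_cur h1 h2 hud hInv
        by_cases hab : sf[i] < ss[j]
        · rw [if_pos hab]
          exact ih (i + 1) j _ _ _ (by omega) (step_advance_i hsf hss h1 h2 hab hInv hcurN)
        · rw [if_neg hab]
          by_cases hba : ss[j] < sf[i]
          · rw [if_pos hba]
            exact ih i (j + 1) _ _ _ (by omega) (step_advance_j hsf hss h1 h2 hba hInv hcurN)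
          · rw [if_neg hba]
            have heq : sf[i] = ss[j] := le_antisymm (le_of_not_gt hba) (le_of_not_gt hab)
            exact ⟨(d, a, b), step_eq hsf hss h1 h2 heq hInv hcurN, rfl⟩
    · rw [smDiffLoop_end sf ss i j hact]
      exact ⟨(d, a, b), at_end hact hInv, rfl⟩

theorem A_minPair (f s : List Int) (hf : f ≠ []) (hs : s ≠ []) :
    ∃ m, MinPair (PySem.List.sorted f (fun x => x) false) (PySem.List.sorted s (fun x => x) false) m ∧
      getSmallestDifferenceArray f s = [m.2.1, m.2.2] := by
  set sf := PySem.List.sorted f (fun x => x) false with hsfdef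
  set ss := PySem.List.sorted s (fun x => x) false with hssdef
  have hsf : sf.Pairwise (· ≤ ·) := PySem.List.sorted_pairwise f (fun x => x)
  have hss : ss.Pairwise (· ≤ ·) := PySem.List.sorted_pairwise s (fun x => x)
  have h1 : 0 < sf.length := by
    rw [List.length_pos_iff]
    intro hnil
    exact hf ((PySem.List.sorted_eq_nil_iff (xs := f) (key := fun x => x) (rev := false)).mp hnil)
  have h2 : 0 < ss.length := by
    rw [List.length_pos_iff]
    intro hnil
    exact hs ((PySem.List.sorted_eq_nil_iff (xs := s) (key := fun x => x) (rev := false)).mp hnil)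
  show ∃ m, MinPair sf ss m ∧ smDiffLoop sf ss 0 0 none [] = [m.2.1, m.2.2]
  rw [smDiffLoop_step sf ss 0 0 h1 h2 none [] true rfl]
  have hInv0 : InvSome sf ss 0 0 (|sf[0] - ss[0]|) (sf[0]) (ss[0]) := by
    refine ⟨rfl, List.getElem_mem h1, List.getElem_mem h2, ?_, ?_⟩
    · intro hi hj; exact ⟨le_refl _, fun _ => le_refl _⟩
    · intro i' j' hi' hj' hlt; omega
  have hcur0 : tripLt (smKey (sf[0]) (ss[0])) (|sf[0] - ss[0]|, sf[0], ss[0]) = false := by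
    simpa [smKey] using tripLt_irrefl (|sf[0] - ss[0]|, sf[0], ss[0])
  simp only [if_true]
  by_cases hab : sf[0] < ss[0]
  · rw [if_pos hab]
    exact loop_spec sf ss hsf hss (sf.length + ss.length) 1 0 _ _ _ (by omega)
      (step_advance_i hsf hss h1 h2 hab hInv0 hcur0)
  · rw [if_neg hab]
    by_cases hba : ss[0] < sf[0]
    · rw [if_pos hba]
      exact loop_spec sf ss hsf hss (sf.length + ss.length) 0 1 _ _ _ (by omega)
        (step_advance_j hsf hss h1 h2 hba hInv0 hcur0)
    · rw [if_neg hba]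
      have heq : sf[0] = ss[0] := le_antisymm (le_of_not_gt hba) (le_of_not_gt hab)
      exact ⟨(|sf[0] - ss[0]|, sf[0], ss[0]), step_eq hsf hss h1 h2 heq hInv0 hcur0, rfl⟩

-- ===== VERDICT (by name: the statement is the Claim_ definition above) =====
theorem getSmallestDifferenceArray_spec : Claim_equal_getSmallestDifferenceArray := by
  intro f s _
  unfold Spec_getSmallestDifferenceArray
  by_cases hf : f = []
  · subst hf
    simp [getSmallestDifferenceArray, getSmallestDifferenceArray_alt, smDiffLoop,
      PySem.List.sorted]
  · by_cases hs : s = []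
    · subst hs
      have hss : PySem.List.sorted ([] : List Int) (fun x => x) false = [] := by
        simp [PySem.List.sorted]
      simp only [getSmallestDifferenceArray, getSmallestDifferenceArray_alt, hss]
      rw [smDiffLoop_end _ _ 0 0 (by simp)]
      rw [show List.flatMap (fun a : Int => List.map (fun b => smKey a b) []) f = [] from by simp]
    · obtain ⟨mA, hmA, hA⟩ := A_minPair f s hf hs
      obtain ⟨mB, hmB, hB⟩ := alt_minPair f s hf hs
      have hmA' : MinPair f s mA :=
        minPair_congr (fun x => PySem.List.mem_sorted f (fun x => x) false x)
          (fun x => PySem.List.mem_sorted s (fun x => x) false x) hmA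
      have : mA = mB := minPair_unique hmA' hmB
      rw [hA, hB, this]
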